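-- pv_equiv track=rewrite | github.com/lotemashkenazy/Git_Start | 31.8/Qa1-3.py | find_max_substring
-- ===== SOURCE A (Python) =====
-- def find_max_substring(word, word_list):
--     max_len = 0
--     for this_word in word_list:
--         temp_indx = 0
--         counter = 0
--         for i in range(len(this_word)):
--             for j in range(temp_indx, len(word)):
--                 if this_word[i] == word[j]:
--                     temp_indx = j
--                     counter += 1
--                     break
--         if counter == len(this_word):
--             if counter > max_len:
--                 max_len = counter
--     return max_len
-- ===== SOURCE B (Python) =====
-- def find_max_substring(word, word_list):
--     # Precompute nxt[i][c] = smallest j >= i with word[j] == c, then each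
--     # candidate word is matched in one pass (preserving A's temp_indx = j rule).
--     n = len(word)
--     nxt = [None] * (n + 1)
--     cur = {}
--     nxt[n] = cur
--     for i in range(n - 1, -1, -1):
--         cur = dict(cur)
--         cur[word[i]] = i
--         nxt[i] = cur
--     max_len = 0
--     for this_word in word_list:
--         pos = 0
--         cnt = 0
--         for ch in this_word:
--             j = nxt[pos].get(ch)
--             if j is not None:
--                 pos = j
--                 cnt += 1
--         if cnt == len(this_word) and cnt > max_len:
--             max_len = cnt
--     return max_len
-- ===== Notes on version B (the rewrite author's own statement) =====
-- stated objective: faster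
-- what changed: Replaces A's per-character rescan of word from temp_indx with a precomputed next-occurrence table (suffix dicts of word), so each candidate word is matched in one pass while preserving A's temp_indx = j matching rule.
import Mathlib
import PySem

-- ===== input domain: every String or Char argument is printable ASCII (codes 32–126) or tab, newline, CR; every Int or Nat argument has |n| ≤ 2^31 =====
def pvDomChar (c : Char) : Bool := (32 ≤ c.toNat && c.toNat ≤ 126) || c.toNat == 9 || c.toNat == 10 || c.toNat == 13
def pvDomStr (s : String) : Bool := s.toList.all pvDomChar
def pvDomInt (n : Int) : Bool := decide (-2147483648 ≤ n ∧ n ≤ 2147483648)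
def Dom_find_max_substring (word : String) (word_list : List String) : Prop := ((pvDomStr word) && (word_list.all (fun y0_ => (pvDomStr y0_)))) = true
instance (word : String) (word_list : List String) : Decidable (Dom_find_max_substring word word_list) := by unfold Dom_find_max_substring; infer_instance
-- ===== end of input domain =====

-- B replaces A's rescan of `word` from temp_indx for every character by a precomputed
-- next-occurrence table of `word`, keeping A's temp_indx = j (not j + 1) matching rule.

-- ===== PORT A =====
-- inner 'for j in range(temp_indx, len(word)): if this_word[i] == word[j]: … break'
def pvInnerA (word : List Char) (c : Char) : List Int → Option Int
  | [] => none
  | j :: js => if some c == PySem.List.pyGet? word j then some j else pvInnerA word c js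

-- one iteration of the 'for i in range(len(this_word))' body; state = (temp_indx, counter)
def pvStepA (word : List Char) (st : Int × Int) (c : Char) : Int × Int :=
  match pvInnerA word c (PySem.List.pyRange st.1 (word.length : Int) 1) with
  | some j => (j, st.2 + 1)
  | none => st

def find_max_substring (word : String) (word_list : List String) : Int :=
  word_list.foldl (fun max_len this_word =>
    let st := (PySem.List.pyRange 0 ((this_word.toList.length : Nat) : Int) 1).foldl
      (fun st i =>
        match PySem.List.pyGet? this_word.toList i with  -- this_word[i]; i always in range
        | some c => pvStepA word.toList st c
        | none => st)
      ((0 : Int), (0 : Int))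
    if st.2 = (this_word.toList.length : Int) then
      (if st.2 > max_len then st.2 else max_len)
    else max_len) 0

-- ===== PORT B =====
-- 'for i in range(n-1,-1,-1): cur = dict(cur); cur[word[i]] = i; nxt[i] = cur', built back-to-front
def pvBuildNxt (cs : List Char) (i : Int) : List (PySem.Dict Char Int) :=
  match cs with
  | [] => [PySem.Dict.empty]
  | c :: rest =>
    let t := pvBuildNxt rest (i + 1)
    (PySem.Dict.insert (t.headD PySem.Dict.empty) c i) :: t

-- one iteration of 'for ch in this_word'; state = (pos, cnt); nxt[pos] always in range
def pvStepB (nxt : List (PySem.Dict Char Int)) (st : Int × Int) (ch : Char) : Int × Int :=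
  match PySem.Dict.get? ((PySem.List.pyGet? nxt st.1).getD PySem.Dict.empty) ch with
  | some j => (j, st.2 + 1)
  | none => st

def find_max_substring_alt (word : String) (word_list : List String) : Int :=
  let nxt := pvBuildNxt word.toList 0
  word_list.foldl (fun max_len this_word =>
    let st := this_word.toList.foldl (pvStepB nxt) ((0 : Int), (0 : Int))
    if st.2 = (this_word.toList.length : Int) ∧ st.2 > max_len then st.2 else max_len) 0

-- ===== PRECONDITION & SPEC =====
def Spec_find_max_substring (word : String) (word_list : List String) (out : Int) : Prop := out = find_max_substring_alt word word_list
instance (word : String) (word_list : List String) (out : Int) : Decidable (Spec_find_max_substring word word_list out) := by unfold Spec_find_max_substring; infer_instance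

-- ===== CLAIM (what is proved, stated in full; the proofs are below) =====
def Claim_equal_find_max_substring : Prop := ∀ (word : String) (word_list : List String), Dom_find_max_substring word word_list → Spec_find_max_substring word word_list (find_max_substring word word_list)

-- ===== LEMMAS AND PROOFS =====

-- first index ≥ p at which c occurs in cs (the value both inner searches compute)
def pvFF (cs : List Char) (p : Nat) (c : Char) : Option Nat :=
  ((cs.drop p).findIdx? (· == c)).map (· + p)

theorem pvInnerA_eq_ff (cs : List Char) (c : Char) :
    ∀ (n p : Nat), cs.length - p = n →
    pvInnerA cs c (PySem.List.pyRange (p : Int) (cs.length : Int) 1)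
      = (pvFF cs p c).map (fun k => (k : Int)) := by
  intro n
  induction n with
  | zero =>
    intro p hp
    have hle : cs.length ≤ p := by omega
    rw [PySem.List.pyRange_one_eq_nil (by exact_mod_cast hle)]
    simp [pvInnerA, pvFF, List.drop_eq_nil_of_le hle]
  | succ n ih =>
    intro p hp
    have hlt : p < cs.length := by omega
    rw [PySem.List.pyRange_one_cons (by exact_mod_cast hlt)]
    have hget : PySem.List.pyGet? cs (p : Int) = some cs[p] := by
      simp [PySem.List.pyGet?_natCast, List.getElem?_eq_getElem hlt]
    have hdrop : cs.drop p = cs[p] :: cs.drop (p + 1) := by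
      exact (List.getElem_cons_drop hlt).symm
    by_cases hc : c = cs[p]
    · rw [pvInnerA, if_pos (by simp [hget, hc])]
      have hb : (cs[p] == c) = true := by simp [hc]
      simp only [pvFF, hdrop, List.findIdx?_cons, hb, cond_true, Option.map_some]
      simp
    · have hc' : (cs[p] == c) = false := beq_eq_false_iff_ne.mpr (Ne.symm hc)
      have hcast : ((p : Int) + 1) = ((p + 1 : Nat) : Int) := by push_cast; ring
      rw [pvInnerA, if_neg (by simp [hget]; exact hc), hcast,
        ih (p + 1) (by omega)]
      simp only [pvFF, hdrop, List.findIdx?_cons, hc']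
      cases hfi : (cs.drop (p + 1)).findIdx? (· == c) <;> simp <;> omega
  termination_by n => n

theorem pvBuildNxt_get_eq_ff (cs : List Char) :
    ∀ (b : Int) (p : Nat) (c : Char),
    PySem.Dict.get? (((pvBuildNxt cs b)[p]?).getD PySem.Dict.empty) c
      = (pvFF cs p c).map (fun k => (k : Int) + b) := by
  induction cs with
  | nil =>
    intro b p c
    cases p <;> simp [pvBuildNxt, pvFF, PySem.Dict.get?_empty]
  | cons c0 rest ih =>
    intro b p c
    have hne : pvBuildNxt rest (b + 1) ≠ [] := by
      cases rest <;> simp [pvBuildNxt]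
    cases p with
    | zero =>
      have hhead : (pvBuildNxt rest (b + 1)).headD PySem.Dict.empty
          = ((pvBuildNxt rest (b + 1))[0]?).getD PySem.Dict.empty := by
        cases h : pvBuildNxt rest (b + 1) with
        | nil => exact absurd h hne
        | cons d t => simp
      simp only [pvBuildNxt, List.getElem?_cons_zero, Option.getD_some]
      rw [PySem.Dict.get?_insert, hhead, ih (b + 1) 0 c]
      by_cases hc : c = c0
      · simp [pvFF, hc, List.findIdx?_cons]
      · have hc' : (c0 == c) = false := beq_eq_false_iff_ne.mpr (Ne.symm hc)
        simp only [if_neg hc, pvFF, List.drop_zero, List.findIdx?_cons, hc']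
        cases hfi : rest.findIdx? (· == c) <;> simp <;> push_cast <;> ring
    | succ p' =>
      simp only [pvBuildNxt, List.getElem?_cons_succ]
      rw [ih (b + 1) p' c]
      simp only [pvFF, List.drop_succ_cons]
      cases hfi : (rest.drop p').findIdx? (· == c) <;> simp <;> push_cast <;> ring

theorem pvInnerA_mem {cs : List Char} {c : Char} {js : List Int} {j : Int}
    (h : pvInnerA cs c js = some j) : j ∈ js := by
  induction js with
  | nil => simp [pvInnerA] at h
  | cons a t ih =>
    rw [pvInnerA] at h
    split at h
    · simp at h; simp [h]
    · simp [ih h]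

theorem pvStepA_eq_pvStepB (cs : List Char) (c : Char) (st : Int × Int)
    (h0 : 0 ≤ st.1) (h1 : st.1 ≤ (cs.length : Int)) :
    pvStepA cs st c = pvStepB (pvBuildNxt cs 0) st c := by
  obtain ⟨i, cnt⟩ := st
  simp only at h0 h1
  obtain ⟨p, rfl⟩ : ∃ p : Nat, i = (p : Int) := ⟨i.toNat, (Int.toNat_of_nonneg h0).symm⟩
  have hA := pvInnerA_eq_ff cs c (cs.length - p) p rfl
  have hB := pvBuildNxt_get_eq_ff cs 0 p c
  have hget : PySem.List.pyGet? (pvBuildNxt cs 0) ((p : Nat) : Int)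
      = (pvBuildNxt cs 0)[p]? := PySem.List.pyGet?_natCast _ _
  rw [pvStepA, pvStepB, hA, hget, hB]
  cases hfi : pvFF cs p c <;> simp [hfi]

theorem pvStepA_bounds (cs : List Char) (c : Char) (st : Int × Int)
    (h0 : 0 ≤ st.1) (h1 : st.1 ≤ (cs.length : Int)) :
    0 ≤ (pvStepA cs st c).1 ∧ (pvStepA cs st c).1 ≤ (cs.length : Int) := by
  rw [pvStepA]
  cases hfi : pvInnerA cs c (PySem.List.pyRange st.1 ((cs.length : Nat) : Int) 1) with
  | none => exact ⟨h0, h1⟩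
  | some j =>
    have hm := pvInnerA_mem hfi
    rw [PySem.List.mem_pyRange_one] at hm
    exact ⟨by simp; omega, by simp; omega⟩

theorem pvFold_eq (cs : List Char) (tw : List Char) :
    ∀ st : Int × Int, 0 ≤ st.1 → st.1 ≤ (cs.length : Int) →
    tw.foldl (pvStepA cs) st = tw.foldl (pvStepB (pvBuildNxt cs 0)) st := by
  induction tw with
  | nil => intro st _ _; rfl
  | cons c t ih =>
    intro st h0 h1
    have hb := pvStepA_bounds cs c st h0 h1
    rw [List.foldl_cons, List.foldl_cons, ← pvStepA_eq_pvStepB cs c st h0 h1]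
    exact ih _ hb.1 hb.2

theorem pvPerwordA (cs tw : List Char) :
    (PySem.List.pyRange 0 ((tw.length : Nat) : Int) 1).foldl
      (fun st i => match PySem.List.pyGet? tw i with
        | some c => pvStepA cs st c
        | none => st) ((0 : Int), (0 : Int))
    = tw.foldl (pvStepA cs) ((0 : Int), (0 : Int)) := by
  have h1 : ∀ (st : Int × Int) (i : Int), i ∈ PySem.List.pyRange 0 ((tw.length : Nat) : Int) 1 →
      (match PySem.List.pyGet? tw i with | some c => pvStepA cs st c | none => st)
      = pvStepA cs st (PySem.List.pyGetD tw i ' ') := by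
    intro st i hi
    rw [PySem.List.mem_pyRange_one] at hi
    obtain ⟨p, rfl⟩ : ∃ p : Nat, i = (p : Int) := ⟨i.toNat, (Int.toNat_of_nonneg hi.1).symm⟩
    have hp : p < tw.length := by exact_mod_cast hi.2
    simp [PySem.List.pyGetD_natCast, List.getElem?_eq_getElem hp, List.getD]
  have h2 := PySem.List.foldl_congr_mem
    (l := PySem.List.pyRange 0 ((tw.length : Nat) : Int) 1) _ _
    ((0 : Int), (0 : Int)) h1
  rw [h2, PySem.List.foldl_pyRange_zero_pyGetD' tw ' ' (pvStepA cs) ((0 : Int), (0 : Int))]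

theorem find_max_substring_spec : Claim_equal_find_max_substring := by
  intro word word_list _
  show find_max_substring word word_list = find_max_substring_alt word word_list
  simp only [find_max_substring, find_max_substring_alt]
  refine PySem.List.foldl_congr_mem _ _ _ _ ?_
  intro m tw _
  rw [pvPerwordA word.toList tw.toList,
    pvFold_eq word.toList tw.toList ((0 : Int), (0 : Int)) le_rfl (by positivity)]
  split_ifs <;> simp_all <;> omega
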